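-- pv_equiv track=rewrite | github.com/paiml/depyler | examples/hard_number_spell.py | digit_word_length_sum
-- ===== SOURCE A (Python) =====
-- def digit_to_word(d: int) -> str:
--     """Convert single digit 0-9 to English word."""
--     if d == 0:
--         return "zero"
--     if d == 1:
--         return "one"
--     if d == 2:
--         return "two"
--     if d == 3:
--         return "three"
--     if d == 4:
--         return "four"
--     if d == 5:
--         return "five"
--     if d == 6:
--         return "six"
--     if d == 7:
--         return "seven"
--     if d == 8:
--         return "eight"
--     if d == 9:
--         return "nine"
--     return "unknown"
--
-- def digit_word_length_sum(n: int) -> int: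
--     """Sum of lengths of each digit word for a number."""
--     val: int = n
--     if val < 0:
--         val = -val
--     if val == 0:
--         return 4
--     total: int = 0
--     while val > 0:
--         d: int = val % 10
--         w: str = digit_to_word(d)
--         total = total + len(w)
--         val = val // 10
--     return total
-- ===== SOURCE B (Python) =====
-- TABLE = {'0': 4, '1': 3, '2': 3, '3': 5, '4': 4,
--          '5': 4, '6': 3, '7': 5, '8': 5, '9': 4}
--
-- def digit_word_length_sum(n: int) -> int:
--     """Sum of lengths of each digit word for a number."""
--     return sum(TABLE[c] for c in str(abs(n)))
-- ===== Notes on version B (the rewrite author's own statement) =====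
-- stated objective: idiomatic
-- what changed: Replaces the %10///10 while-loop and the word-building helper by iterating over the decimal string str(abs(n)) and summing a fixed char->word-length table, which also removes the n==0 special case.
import Mathlib
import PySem

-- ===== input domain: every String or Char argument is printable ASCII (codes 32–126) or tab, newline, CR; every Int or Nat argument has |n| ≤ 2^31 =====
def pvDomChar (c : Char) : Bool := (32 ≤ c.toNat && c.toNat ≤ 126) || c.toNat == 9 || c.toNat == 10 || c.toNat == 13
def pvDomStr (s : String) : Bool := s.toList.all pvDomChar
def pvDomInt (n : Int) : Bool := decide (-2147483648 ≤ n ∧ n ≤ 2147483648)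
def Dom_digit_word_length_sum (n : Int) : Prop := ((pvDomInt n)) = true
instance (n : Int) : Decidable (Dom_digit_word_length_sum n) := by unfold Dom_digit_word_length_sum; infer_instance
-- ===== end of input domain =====

-- B replaces A's %10 // 10 while-loop and word-building helper by summing a fixed
-- char→word-length table over the decimal string of |n| (idiomatic; same cost).

-- ===== PORT A =====
def digit_to_word (d : Int) : String :=
  if d = 0 then "zero"
  else if d = 1 then "one"
  else if d = 2 then "two"
  else if d = 3 then "three"
  else if d = 4 then "four"
  else if d = 5 then "five"
  else if d = 6 then "six"
  else if d = 7 then "seven"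
  else if d = 8 then "eight"
  else if d = 9 then "nine"
  else "unknown"

-- the 'while val > 0' loop of A, with its 'total' accumulator
def pvLoopA (val total : Int) : Int :=
  if h : 0 < val then
    pvLoopA (PySem.Int.floordiv val 10)
      (total + PySem.Str.len (digit_to_word (PySem.Int.mod val 10)))
  else total
termination_by val.toNat
decreasing_by
  simp only [PySem.Int.floordiv_eq_ediv_of_pos (by norm_num : (0:Int) < 10)]
  omega

def digit_word_length_sum (n : Int) : Int :=
  let val : Int := n
  let val : Int := if val < 0 then -val else val
  if val = 0 then 4 else pvLoopA val 0

-- ===== PORT B =====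
def pvTable : PySem.Dict Char Int :=
  PySem.Dict.ofList [('0', 4), ('1', 3), ('2', 3), ('3', 5), ('4', 4),
                     ('5', 4), ('6', 3), ('7', 5), ('8', 5), ('9', 4)]

-- TABLE[c] is ported as getD with default 0: every char of str(abs(n)) is a key,
-- so the KeyError branch is unreachable.
def digit_word_length_sum_alt (n : Int) : Int :=
  ((PySem.Int.toStr (if n < 0 then -n else n)).toList.map
    (fun c => pvTable.getD c 0)).sum

-- ===== PRECONDITION & SPEC =====
def Spec_digit_word_length_sum (n : Int) (out : Int) : Prop := out = digit_word_length_sum_alt n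
instance (n : Int) (out : Int) : Decidable (Spec_digit_word_length_sum n out) := by unfold Spec_digit_word_length_sum; infer_instance

-- ===== CLAIM (what is proved, stated in full; the proofs are below) =====
def Claim_equal_digit_word_length_sum : Prop := ∀ (n : Int), Dom_digit_word_length_sum n → Spec_digit_word_length_sum n (digit_word_length_sum n)

-- ===== LEMMAS AND PROOFS =====

-- word length of the digit d, the quantity A's loop adds per digit
def pvG (d : Nat) : Int := PySem.Str.len (digit_to_word (d : Int))

-- A's loop as a pure function of the remaining value
def pvL (n : Nat) : Int :=
  if n = 0 then 0 else pvL (n / 10) + pvG (n % 10)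
decreasing_by omega

lemma pvTable_digitChar (d : Nat) (hd : d < 10) :
    pvTable.getD (Nat.digitChar d) 0 = pvG d := by
  interval_cases d <;> decide

lemma pvLoopA_eq (val total : Int) (h0 : 0 ≤ val) :
    pvLoopA val total = total + pvL val.toNat := by
  generalize hm : val.toNat = m
  induction m using Nat.strong_induction_on generalizing val total with
  | _ m ih =>
    rw [pvLoopA, pvL]
    by_cases h : 0 < val
    · have h10 : (0:Int) < 10 := by norm_num
      rw [dif_pos h,
        ih ((PySem.Int.floordiv val 10).toNat)
          (by simp only [PySem.Int.floordiv_eq_ediv_of_pos h10]; omega)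
          _ _ (by simp only [PySem.Int.floordiv_eq_ediv_of_pos h10]; omega) rfl]
      have hiff : ¬ m = 0 := by omega
      rw [if_neg hiff]
      have hmod : PySem.Int.mod val 10 = ((m % 10 : Nat) : Int) := by
        simp only [PySem.Int.mod_eq_emod_of_pos h10]; omega
      have hdiv : (PySem.Int.floordiv val 10).toNat = m / 10 := by
        simp only [PySem.Int.floordiv_eq_ediv_of_pos h10]; omega
      rw [hmod, hdiv]
      simp [pvG]
      ring
    · rw [dif_neg h]
      have : m = 0 := by omega
      simp [this]

lemma toDigitsCore_sum (fuel : Nat) : ∀ (n : Nat) (ds : List Char), n < fuel →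
    ((Nat.toDigitsCore 10 fuel n ds).map (fun c => pvTable.getD c 0)).sum
      = (if n = 0 then 4 else pvL n) + ((ds.map (fun c => pvTable.getD c 0)).sum) := by
  induction fuel with
  | zero => intro n ds h; omega
  | succ fuel ih =>
    intro n ds h
    rw [Nat.toDigitsCore]
    by_cases hz : n = 0
    · subst hz
      simp
      decide
    · have hmod : n % 10 < 10 := by omega
      by_cases hq : n / 10 = 0
      · rw [if_pos hq, if_neg hz]
        conv_rhs => rw [pvL, if_neg hz, hq, pvL, if_pos rfl]
        simp [pvTable_digitChar _ hmod]
      · rw [if_neg hq, ih (n / 10) _ (by omega), if_neg hq]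
        conv_rhs => rw [pvL]
        rw [if_neg hz]
        simp [pvTable_digitChar _ hmod]
        rw [if_neg hz]
        ring

lemma alt_eq (n : Int) :
    digit_word_length_sum_alt n = if n.natAbs = 0 then 4 else pvL n.natAbs := by
  unfold digit_word_length_sum_alt
  have habs : (if n < 0 then -n else n) = (n.natAbs : Int) := by omega
  rw [habs, PySem.Int.toList_toStr]
  have h2 : ∀ m : Nat, PySem.Int.toChars (m : Int) = Nat.toDigits 10 m := by
    intro m
    simp [PySem.Int.toChars]
  rw [h2 n.natAbs, Nat.toDigits, toDigitsCore_sum (n.natAbs + 1) n.natAbs [] (by omega)]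
  simp

-- ===== VERDICT (by name: the statement is the Claim_ definition above) =====
theorem digit_word_length_sum_spec : Claim_equal_digit_word_length_sum := by
  intro n _
  unfold Spec_digit_word_length_sum digit_word_length_sum
  rw [alt_eq n]
  have habs : (if n < 0 then -n else n) = (n.natAbs : Int) := by omega
  simp only [habs]
  by_cases hz : n.natAbs = 0
  · simp [hz]
  · rw [if_neg (by exact_mod_cast hz), if_neg hz, pvLoopA_eq _ _ (by positivity)]
    rw [Int.toNat_natCast, zero_add]
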